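-- pv_equiv track=rewrite | github.com/ManojKumarPatnaik/practice-alg | Solution/WordSplit.py | solution
-- ===== SOURCE A (Python) =====
-- def solution(S):
--   """
--   Splits a string into a minimal number of substrings in such a way that no letter occurs more than once in each substring.
--
--   Args:
--     S: A string consisting of lowercase letters of the English alphabet.
--
--   Returns:
--     The minimum number of substrings into which the string has to be split.
--   """
--
--   # Initialize a dictionary to store the last seen index of each character
--   lastSeenChar = {}
--
--   # Initialize a variable to keep track of the start of the current substring
--   subStringStartPoint = 0
--
--   # Initialize a variable to count the number of substrings
--   numberSubStrings = 0
--
--   # Iterate over the string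
--   for i in range(len(S)):
--     # If the current character has been seen before and its last seen index is within the current substring
--     if S[i] in lastSeenChar and lastSeenChar[S[i]] >= subStringStartPoint:
--       # Start a new substring from the current index
--       subStringStartPoint = i
--
--       # Increment the count of substrings
--       numberSubStrings += 1
--
--     # Update the last seen index of the current character
--     lastSeenChar[S[i]] = i
--
--   # Return the total number of substrings, accounting for the last substring
--   return numberSubStrings + 1
-- ===== SOURCE B (Python) =====
-- def solution(S):
--   parts = 1
--   i = 0
--   n = len(S)
--   while True:
--     seen = set()
--     while i < n and S[i] not in seen:
--       seen.add(S[i])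
--       i += 1
--     if i == n:
--       return parts
--     parts += 1
-- ===== Notes on version B (the rewrite author's own statement) =====
-- stated objective: alternative
-- what changed: Replaces A's single indexed pass with a dict of last-seen indices and a window-start pointer by a staged chunk-consuming loop: an inner while consumes the maximal all-distinct prefix of the remainder, the outer loop counts one part per chunk; no indices are stored and no bound comparison is made.
import Mathlib
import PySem

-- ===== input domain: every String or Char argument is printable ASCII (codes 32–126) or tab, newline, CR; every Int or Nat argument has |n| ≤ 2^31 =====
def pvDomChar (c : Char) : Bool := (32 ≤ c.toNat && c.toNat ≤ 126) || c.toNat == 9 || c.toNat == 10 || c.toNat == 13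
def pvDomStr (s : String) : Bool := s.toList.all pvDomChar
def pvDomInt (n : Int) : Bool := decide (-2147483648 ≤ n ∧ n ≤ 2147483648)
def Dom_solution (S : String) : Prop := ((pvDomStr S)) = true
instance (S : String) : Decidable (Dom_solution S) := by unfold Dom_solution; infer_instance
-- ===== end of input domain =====

-- B replaces A's single indexed pass (dict of last-seen indices + window-start pointer) by a
-- staged chunk-consuming loop: an inner while eats the maximal all-distinct prefix of the
-- remainder, the outer loop counts one part per chunk (same O(n) cost, different decomposition).

-- ===== PORT A =====
-- one step of A's loop: state = (lastSeenChar, subStringStartPoint, numberSubStrings), item = (i, S[i])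
def solStepA (st : PySem.Dict Char Int × Int × Int) (p : Int × Char) :
    PySem.Dict Char Int × Int × Int :=
  let d := st.1; let start := st.2.1; let cnt := st.2.2
  let i := p.1; let c := p.2
  let hit := match d.get? c with
    | some j => decide (start ≤ j)   -- S[i] in lastSeenChar and lastSeenChar[S[i]] >= subStringStartPoint
    | none => false
  if hit then (d.insert c i, i, cnt + 1) else (d.insert c i, start, cnt)

def solution (S : String) : Int :=
  -- 'for i in range(len(S)): … S[i] …' iterates the characters with their indices
  let st := (PySem.List.enumerate S.toList 0).foldl solStepA (PySem.Dict.empty, 0, 0)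
  st.2.2 + 1

-- ===== PORT B =====
-- inner while loop: number of leading characters consumed before a repeat (relative to seen)
def scanLen (seen : PySem.Set Char) : List Char → Nat
  | [] => 0
  | c :: rest =>
      if PySem.Set.contains seen c then 0
      else scanLen (PySem.Set.add seen c) rest + 1

-- outer while loop: consume one maximal distinct chunk, count it, repeat.
-- (fuel = remaining length, a totalization device only: each chunk consumes >= 1 char)
def solAltGo : Nat -> List Char -> Int -> Int
  | 0, _, parts => parts
  | fuel + 1, xs, parts =>
      let k := scanLen PySem.Set.empty xs
      if k = xs.length then parts
      else solAltGo fuel (xs.drop k) (parts + 1)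

def solution_alt (S : String) : Int := solAltGo S.toList.length S.toList 1

-- ===== PRECONDITION & SPEC =====
def Spec_solution (S : String) (out : Int) : Prop := out = solution_alt S
instance (S : String) (out : Int) : Decidable (Spec_solution S out) := by unfold Spec_solution; infer_instance

-- ===== CLAIM (what is proved, stated in full; the proofs are below) =====
def Claim_equal_solution : Prop := ∀ (S : String), Dom_solution S → Spec_solution S (solution S)

-- ===== LEMMAS AND PROOFS =====

theorem scanLen_le (seen : PySem.Set Char) (xs : List Char) : scanLen seen xs ≤ xs.length := by
  induction xs generalizing seen with
  | nil => simp [scanLen]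
  | cons c rest ih =>
      simp only [scanLen, List.length_cons]
      split
      · omega
      · exact Nat.add_le_add_right (ih _) 1

theorem scanLen_empty_cons (c : Char) (rest : List Char) :
    scanLen PySem.Set.empty (c :: rest) = scanLen (PySem.Set.add PySem.Set.empty c) rest + 1 := by
  have h : PySem.Set.contains PySem.Set.empty c = false := by
    rw [Bool.eq_false_iff]; intro h
    have := (PySem.Set.contains_iff _ _).mp h
    simp [PySem.Set.empty] at this
  simp [scanLen]

-- proof-side bridge: A's loop rephrased as a fold over characters with a set of the
-- current chunk's characters (the dict/start test collapses to set membership)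
def solStepB (st : PySem.Set Char × Int) (c : Char) : PySem.Set Char × Int :=
  if PySem.Set.contains st.1 c then (PySem.Set.ofList [c], st.2 + 1)
  else (PySem.Set.add st.1 c, st.2)

-- loop invariant: A's current-window test agrees with set membership, all stored
-- indices are below the running index, and the window start does not exceed it
theorem sol_loop_eq (xs : List Char) (i : Int) (d : PySem.Dict Char Int)
    (start cnt : Int) (cur : PySem.Set Char)
    (hidx : ∀ c j, d.get? c = some j → j < i)
    (hstart : start ≤ i)
    (hiff : ∀ c, (match d.get? c with
                    | some j => decide (start ≤ j)
                    | none => false) = PySem.Set.contains cur c) :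
    ((PySem.List.enumerate xs i).foldl solStepA (d, start, cnt)).2.2
      = (xs.foldl solStepB (cur, cnt)).2 := by
  induction xs generalizing i d start cnt cur with
  | nil => simp [PySem.List.enumerate_nil]
  | cons c rest ih =>
    rw [PySem.List.enumerate_cons]
    simp only [List.foldl_cons]
    have hhit : (match d.get? c with
        | some j => decide (start ≤ j)
        | none => false) = PySem.Set.contains cur c := hiff c
    by_cases hc : PySem.Set.contains cur c = true
    · -- split: A resets start to i, the rephrased loop resets the set to {c}
      rw [show solStepA (d, start, cnt) (i, c) = (d.insert c i, i, cnt + 1) by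
            simp only [solStepA]; rw [hhit, hc]; rfl,
          show solStepB (cur, cnt) c = (PySem.Set.ofList [c], cnt + 1) by
            simp only [solStepB]; rw [hc]; rfl]
      apply ih
      · intro c' j h
        rw [PySem.Dict.get?_insert] at h
        split at h
        · cases h; omega
        · exact lt_trans (hidx c' j h) (by omega)
      · omega
      · intro c'
        rw [PySem.Dict.get?_insert]
        by_cases hcc : c' = c
        · subst hcc
          simp [PySem.Set.ofList]
        · simp only [if_neg hcc]
          have : PySem.Set.contains (PySem.Set.ofList [c]) c' = false := by
            rw [Bool.eq_false_iff]
            intro h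
            exact hcc (by simpa using (PySem.Set.contains_iff _ _).mp h)
          rw [this]
          cases hdj : d.get? c' with
          | none => rfl
          | some j =>
            have := hidx c' j hdj
            simp; omega
    · -- no split: A records i, the rephrased loop adds c
      rw [show solStepA (d, start, cnt) (i, c) = (d.insert c i, start, cnt) by
            simp only [solStepA]; rw [hhit, Bool.eq_false_iff.mpr hc]; rfl,
          show solStepB (cur, cnt) c = (PySem.Set.add cur c, cnt) by
            simp only [solStepB]; rw [Bool.eq_false_iff.mpr hc]; rfl]
      apply ih
      · intro c' j h
        rw [PySem.Dict.get?_insert] at h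
        split at h
        · cases h; omega
        · exact lt_trans (hidx c' j h) (by omega)
      · omega
      · intro c'
        rw [PySem.Dict.get?_insert]
        by_cases hcc : c' = c
        · subst hcc
          have : PySem.Set.contains (PySem.Set.add cur c') c' = true :=
            (PySem.Set.contains_iff _ _).mpr (by rw [PySem.Set.mem_add]; right; rfl)
          rw [this]
          simp; omega
        · simp only [if_neg hcc]
          have : PySem.Set.contains (PySem.Set.add cur c) c' = PySem.Set.contains cur c' := by
            cases hcv : PySem.Set.contains cur c' with
            | true =>
                exact (PySem.Set.contains_iff _ _).mpr
                  ((PySem.Set.mem_add _ _ _).mpr (Or.inl ((PySem.Set.contains_iff _ _).mp hcv)))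
            | false =>
                apply Bool.eq_false_iff.mpr
                intro h
                rcases (PySem.Set.mem_add _ _ _).mp ((PySem.Set.contains_iff _ _).mp h) with h' | h'
                · rw [(PySem.Set.contains_iff cur c').mpr h'] at hcv; cases hcv
                · exact hcc h'
          rw [this, hiff c']

-- a repeat-free stretch leaves the count of the rephrased fold unchanged
theorem foldl_full (xs : List Char) (seen : PySem.Set Char) (cnt : Int)
    (h : scanLen seen xs = xs.length) :
    (xs.foldl solStepB (seen, cnt)).2 = cnt := by
  induction xs generalizing seen with
  | nil => simp
  | cons c rest ih =>
      simp only [scanLen, List.length_cons] at h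
      by_cases hc : PySem.Set.contains seen c = true
      · rw [if_pos hc] at h; omega
      · rw [if_neg hc] at h
        simp only [List.foldl_cons,
          show solStepB (seen, cnt) c = (PySem.Set.add seen c, cnt) by
            simp only [solStepB]; rw [Bool.eq_false_iff.mpr hc]; rfl]
        exact ih _ (by omega)

-- consuming a chunk: after the first repeat, the fold's full state is a fresh fold
-- on the remainder with the count bumped
theorem foldl_chunk (xs : List Char) (seen : PySem.Set Char) (cnt : Int)
    (h : scanLen seen xs < xs.length) :
    xs.foldl solStepB (seen, cnt)
      = (xs.drop (scanLen seen xs)).foldl solStepB (PySem.Set.empty, cnt + 1) := by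
  induction xs generalizing seen cnt with
  | nil => simp at h
  | cons c rest ih =>
      by_cases hc : PySem.Set.contains seen c = true
      · have hk : scanLen seen (c :: rest) = 0 := by
          simp only [scanLen]
          rw [if_pos hc]
        rw [hk]
        simp only [List.drop_zero, List.foldl_cons,
          show solStepB (seen, cnt) c = (PySem.Set.ofList [c], cnt + 1) by
            simp only [solStepB]; rw [hc]; rfl]
        have hempty : PySem.Set.contains PySem.Set.empty c = false := by
          rw [Bool.eq_false_iff]; intro h'
          have := (PySem.Set.contains_iff _ _).mp h'
          simp [PySem.Set.empty] at this
        rw [show solStepB (PySem.Set.empty, cnt + 1) c = (PySem.Set.add PySem.Set.empty c, cnt + 1) by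
              simp only [solStepB]; rw [hempty]; rfl]
        rfl
      · have hk : scanLen seen (c :: rest) = scanLen (PySem.Set.add seen c) rest + 1 := by
          simp only [scanLen]
          rw [if_neg hc]
        rw [hk] at h ⊢
        simp only [List.length_cons] at h
        simp only [List.drop_succ_cons, List.foldl_cons,
          show solStepB (seen, cnt) c = (PySem.Set.add seen c, cnt) by
            simp only [solStepB]; rw [Bool.eq_false_iff.mpr hc]; rfl]
        exact ih _ _ (by omega)

-- the rephrased fold computes exactly B's chunk count
theorem fold_eq_outer : forall (fuel : Nat) (xs : List Char), xs.length <= fuel ->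
    forall (cnt p : Int),
    (xs.foldl solStepB (PySem.Set.empty, cnt)).2 + p = cnt + solAltGo fuel xs p := by
  intro fuel
  induction fuel with
  | zero =>
      intro xs hn cnt p
      have hx : xs = [] := List.eq_nil_of_length_eq_zero (Nat.le_zero.mp hn)
      subst hx
      simp [solAltGo]
  | succ fuel ih =>
      intro xs hn cnt p
      by_cases hfull : scanLen PySem.Set.empty xs = xs.length
      · rw [foldl_full xs _ cnt hfull]
        simp only [solAltGo]
        rw [if_pos hfull]
      · have hlt : scanLen PySem.Set.empty xs < xs.length :=
          lt_of_le_of_ne (scanLen_le _ _) hfull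
        rw [foldl_chunk xs _ cnt hlt]
        simp only [solAltGo]
        rw [if_neg hfull]
        have hpos : 1 <= scanLen PySem.Set.empty xs := by
          cases xs with
          | nil => simp at hlt
          | cons c rest => rw [scanLen_empty_cons]; omega
        have hdrop : (xs.drop (scanLen PySem.Set.empty xs)).length <= fuel := by
          simp only [List.length_drop]; omega
        have := ih (xs.drop (scanLen PySem.Set.empty xs)) hdrop (cnt + 1) (p + 1)
        omega

-- ===== VERDICT (by name: the statement is the Claim_ definition above) =====
theorem solution_spec : Claim_equal_solution := by
  intro S _
  unfold Spec_solution solution solution_alt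
  simp only []
  rw [sol_loop_eq S.toList 0 PySem.Dict.empty 0 0 PySem.Set.empty]
  · have := fold_eq_outer S.toList.length S.toList le_rfl 0 1
    omega
  · intro c j h; rw [PySem.Dict.get?_empty] at h; cases h
  · omega
  · intro c; rw [PySem.Dict.get?_empty]; rfl
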